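-- pv_equiv track=rewrite | github.com/kristbaum/arthistorical-semantic-data-extraction | match_captions.py | parse_coords_points
-- ===== SOURCE A (Python) =====
-- def parse_coords_points(points_str: str) -> tuple[int, int, int, int]:
--     """Parse a 'points' attribute into (x, y, w, h) bounding box."""
--     pairs = []
--     for pair in points_str.strip().split():
--         parts = pair.split(",")
--         if len(parts) == 2:
--             pairs.append((int(parts[0]), int(parts[1])))
--     if not pairs:
--         return 0, 0, 0, 0
--     xs = [p[0] for p in pairs]
--     ys = [p[1] for p in pairs]
--     x_min, x_max = min(xs), max(xs)
--     y_min, y_max = min(ys), max(ys)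
--     return x_min, y_min, x_max - x_min, y_max - y_min
-- ===== SOURCE B (Python) =====
-- def parse_coords_points(points_str: str) -> tuple[int, int, int, int]:
--     """Parse a 'points' attribute into (x, y, w, h) bounding box."""
--     box = None  # (x_min, x_max, y_min, y_max) running extrema
--     for token in points_str.strip().split():
--         parts = token.split(",")
--         if len(parts) == 2:
--             x, y = int(parts[0]), int(parts[1])
--             if box is None:
--                 box = (x, x, y, y)
--             else:
--                 box = (min(box[0], x), max(box[1], x), min(box[2], y), max(box[3], y))
--     if box is None:
--         return 0, 0, 0, 0
--     return box[0], box[2], box[1] - box[0], box[3] - box[2]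
-- ===== Notes on version B (the rewrite author's own statement) =====
-- stated objective: alternative
-- what changed: Instead of building a list of parsed pairs and then scanning it four times with min/max over two projected lists, B makes a single pass over the tokens maintaining four running extrema (x_min, x_max, y_min, y_max) in an optional box.
import Mathlib
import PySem

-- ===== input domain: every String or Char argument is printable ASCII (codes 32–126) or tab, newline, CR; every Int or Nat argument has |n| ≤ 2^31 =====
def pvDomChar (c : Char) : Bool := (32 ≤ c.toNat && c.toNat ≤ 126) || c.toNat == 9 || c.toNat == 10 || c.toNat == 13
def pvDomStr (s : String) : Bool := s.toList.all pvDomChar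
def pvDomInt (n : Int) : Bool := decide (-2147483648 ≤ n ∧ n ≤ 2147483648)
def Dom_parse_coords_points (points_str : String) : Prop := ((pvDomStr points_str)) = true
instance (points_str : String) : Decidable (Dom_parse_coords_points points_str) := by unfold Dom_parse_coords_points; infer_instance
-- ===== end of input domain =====

-- B replaces A's pair-list plus four min/max scans by one fold maintaining the four running
-- extrema (objective: alternative single-pass decomposition; same asymptotic cost).

-- ===== PORT A =====
-- literal port of A: build the list of parsed pairs, then min/max each coordinate list.
-- int() raising ValueError is excluded by Pre_; the `.getD 0` defaults are unreachable there.
def parse_coords_points (points_str : String) : Int × Int × Int × Int :=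
  let pairs := (PySem.Str.split₀ (PySem.Str.strip points_str)).foldl
    (fun acc pair =>
      let parts := (PySem.Str.split? pair ",").getD []
      if parts.length = 2 then
        acc ++ [((PySem.Int.ofStr? (parts.getD 0 "")).getD 0,
                 (PySem.Int.ofStr? (parts.getD 1 "")).getD 0)]
      else acc) ([] : List (Int × Int))
  if pairs = [] then (0, 0, 0, 0)
  else
    let xs := pairs.map (·.1)
    let ys := pairs.map (·.2)
    let x_min := (PySem.List.min? xs (fun v => v)).getD 0
    let x_max := (PySem.List.max? xs (fun v => v)).getD 0
    let y_min := (PySem.List.min? ys (fun v => v)).getD 0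
    let y_max := (PySem.List.max? ys (fun v => v)).getD 0
    (x_min, y_min, x_max - x_min, y_max - y_min)

-- ===== PORT B =====
-- loop body of B: update the optional running (x_min, x_max, y_min, y_max) box with one token.
def pcpStep (box : Option (Int × Int × Int × Int)) (token : String) :
    Option (Int × Int × Int × Int) :=
  let parts := (PySem.Str.split? token ",").getD []
  if parts.length = 2 then
    let x := (PySem.Int.ofStr? (parts.getD 0 "")).getD 0
    let y := (PySem.Int.ofStr? (parts.getD 1 "")).getD 0
    match box with
    | none => some (x, x, y, y)
    | some (a, b, c, d) => some (min a x, max b x, min c y, max d y)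
  else box

def parse_coords_points_alt (points_str : String) : Int × Int × Int × Int :=
  match (PySem.Str.split₀ (PySem.Str.strip points_str)).foldl pcpStep none with
  | none => (0, 0, 0, 0)
  | some (a, _b, c, _d) => (a, c, _b - a, _d - c)

-- ===== PRECONDITION & SPEC =====
-- Pre_ excludes exactly the inputs where Python's int() raises ValueError on a token that
-- split into two comma parts (A raises there; B raises identically).
def Pre_parse_coords_points (points_str : String) : Prop :=
  ∀ t ∈ PySem.Str.split₀ (PySem.Str.strip points_str),
    ((PySem.Str.split? t ",").getD []).length = 2 →
      (PySem.Int.ofStr? (((PySem.Str.split? t ",").getD []).getD 0 "")).isSome = true ∧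
      (PySem.Int.ofStr? (((PySem.Str.split? t ",").getD []).getD 1 "")).isSome = true
instance (points_str : String) : Decidable (Pre_parse_coords_points points_str) := by
  unfold Pre_parse_coords_points; infer_instance

def pvWitness_parse_coords_points : String := "1,2 30,-4"

def Spec_parse_coords_points (points_str : String) (out : Int × Int × Int × Int) : Prop :=
  out = parse_coords_points_alt points_str
instance (points_str : String) (out : Int × Int × Int × Int) :
    Decidable (Spec_parse_coords_points points_str out) := by
  unfold Spec_parse_coords_points; infer_instance

-- ===== CLAIM (what is proved, stated in full; the proofs are below) =====
def Claim_equal_parse_coords_points : Prop :=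
  ∀ (points_str : String), Dom_parse_coords_points points_str →
    Pre_parse_coords_points points_str →
      Spec_parse_coords_points points_str (parse_coords_points points_str)

-- ===== LEMMAS AND PROOFS =====

-- shared token parser used only by the proofs
def pcpParse? (t : String) : Option (Int × Int) :=
  let parts := (PySem.Str.split? t ",").getD []
  if parts.length = 2 then
    some ((PySem.Int.ofStr? (parts.getD 0 "")).getD 0,
          (PySem.Int.ofStr? (parts.getD 1 "")).getD 0)
  else none

def pcpCombine (b : Int × Int × Int × Int) (p : Int × Int) : Int × Int × Int × Int :=
  (min b.1 p.1, max b.2.1 p.1, min b.2.2.1 p.2, max b.2.2.2 p.2)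

lemma pcpAStep_eq (acc : List (Int × Int)) (t : String) :
    (let parts := (PySem.Str.split? t ",").getD []
     if parts.length = 2 then
       acc ++ [((PySem.Int.ofStr? (parts.getD 0 "")).getD 0,
                (PySem.Int.ofStr? (parts.getD 1 "")).getD 0)]
     else acc) = acc ++ (pcpParse? t).toList := by
  unfold pcpParse?
  by_cases h : ((PySem.Str.split? t ",").getD []).length = 2 <;> simp [h]

lemma pcpStep_eq (box : Option (Int × Int × Int × Int)) (t : String) :
    pcpStep box t =
      match pcpParse? t with
      | none => box
      | some p =>
        match box with
        | none => some (p.1, p.1, p.2, p.2)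
        | some b => some (pcpCombine b p) := by
  unfold pcpStep pcpParse? pcpCombine
  by_cases h : ((PySem.Str.split? t ",").getD []).length = 2 <;> cases box <;> simp [h]

lemma pcpA_foldl (ts : List String) (acc : List (Int × Int)) :
    ts.foldl (fun acc pair =>
      let parts := (PySem.Str.split? pair ",").getD []
      if parts.length = 2 then
        acc ++ [((PySem.Int.ofStr? (parts.getD 0 "")).getD 0,
                 (PySem.Int.ofStr? (parts.getD 1 "")).getD 0)]
      else acc) acc = acc ++ ts.filterMap pcpParse? := by
  induction ts generalizing acc with
  | nil => simp
  | cons t ts ih =>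
    rw [List.foldl_cons, pcpAStep_eq, List.filterMap_cons, ih]
    cases hpt : pcpParse? t <;> simp

lemma pcpB_foldl_some (ps : List String) (b : Int × Int × Int × Int) :
    ps.foldl pcpStep (some b) = some ((ps.filterMap pcpParse?).foldl pcpCombine b) := by
  induction ps generalizing b with
  | nil => simp
  | cons t ts ih =>
    rw [List.foldl_cons, pcpStep_eq, List.filterMap_cons]
    cases hpt : pcpParse? t <;> simp [ih]

lemma pcpB_foldl_none (ps : List String) :
    ps.foldl pcpStep none =
      match ps.filterMap pcpParse? with
      | [] => none
      | p :: rest => some (rest.foldl pcpCombine (p.1, p.1, p.2, p.2)) := by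
  induction ps with
  | nil => simp
  | cons t ts ih =>
    rw [List.foldl_cons, pcpStep_eq, List.filterMap_cons]
    cases hpt : pcpParse? t <;> simp [ih, pcpB_foldl_some]

lemma pcpCombine_components (ps : List (Int × Int)) (a b c d : Int) :
    ps.foldl pcpCombine (a, b, c, d) =
      (ps.foldl (fun v p => min v p.1) a, ps.foldl (fun v p => max v p.1) b,
       ps.foldl (fun v p => min v p.2) c, ps.foldl (fun v p => max v p.2) d) := by
  induction ps generalizing a b c d with
  | nil => rfl
  | cons p ps ih => simp [pcpCombine, ih]

-- ===== VERDICT (by name: the statement is the Claim_ definition above) =====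
theorem parse_coords_points_spec : Claim_equal_parse_coords_points := by
  intro s _hDom _hPre
  simp only [Spec_parse_coords_points, parse_coords_points, parse_coords_points_alt]
  rw [pcpA_foldl, pcpB_foldl_none]
  generalize (PySem.Str.split₀ (PySem.Str.strip s)).filterMap pcpParse? = ps
  cases ps with
  | nil => simp
  | cons p rest =>
    simp only [List.nil_append, List.map_cons, reduceCtorEq, not_false_eq_true, if_neg]
    rw [PySem.List.min?_id_cons, PySem.List.max?_id_cons,
        PySem.List.min?_id_cons, PySem.List.max?_id_cons]
    simp [List.foldl_map, pcpCombine_components]
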